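-- pv_equiv track=rewrite | github.com/tueda/PS2020SS | scripts/viewer.py | is_empty_block
-- ===== SOURCE A (Python) =====
-- from typing import List
--
-- StringList = List[str]
--
-- def is_empty_block(lines: StringList) -> bool:
--     """Return True for an empty block of lines."""
--     first = True
--     for line in lines:
--         if first:
--             first = False
--             if line.startswith("#"):
--                 continue
--         if line.strip():
--             return False
--     return True
-- ===== SOURCE B (Python) =====
-- def is_empty_block(lines):
--     """Return True for an empty block of lines."""
--     start = 1 if lines and lines[0].startswith("#") else 0
--     return not "".join(lines[start:]).strip()
-- ===== Notes on version B (the rewrite author's own statement) =====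
-- stated objective: simpler
-- what changed: The per-iteration 'first' flag and early-return loop are replaced by computing a start offset once (skip a leading '#' comment line) and testing emptiness of the single string ''.join(lines[start:]).strip().
import Mathlib
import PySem

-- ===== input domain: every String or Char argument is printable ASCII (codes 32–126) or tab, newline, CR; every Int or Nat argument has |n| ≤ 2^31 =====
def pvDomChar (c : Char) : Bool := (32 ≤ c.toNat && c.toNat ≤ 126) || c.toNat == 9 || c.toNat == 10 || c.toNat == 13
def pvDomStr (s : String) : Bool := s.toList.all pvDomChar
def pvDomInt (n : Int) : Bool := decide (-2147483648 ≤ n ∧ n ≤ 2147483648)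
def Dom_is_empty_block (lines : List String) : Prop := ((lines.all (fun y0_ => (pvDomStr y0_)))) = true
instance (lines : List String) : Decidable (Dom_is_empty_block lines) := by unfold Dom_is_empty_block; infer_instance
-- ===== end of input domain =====

-- B replaces A's per-iteration 'first' flag by a single start offset and one
-- joined-string emptiness test (objective: simpler).


-- ===== PORT A =====
-- the 'for line in lines' loop with its 'first' flag and early 'return False'
def isEmptyBlockLoop : List String → Bool → Bool
  | [], _ => true
  | line :: rest, first =>
    if first && PySem.Str.startswith line "#" then isEmptyBlockLoop rest false
    else if PySem.Str.strip line ≠ "" then false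
    else isEmptyBlockLoop rest false

def is_empty_block (lines : List String) : Bool :=
  isEmptyBlockLoop lines true

-- ===== PORT B =====
def is_empty_block_alt (lines : List String) : Bool :=
  -- start = 1 if lines and lines[0].startswith("#") else 0
  let start : Int :=
    match lines with
    | [] => 0
    | l :: _ => if PySem.Str.startswith l "#" then 1 else 0
  -- not "".join(lines[start:]).strip()
  PySem.Str.strip (PySem.Str.join "" (PySem.List.slice lines (some start) none)) == ""

-- ===== PRECONDITION & SPEC =====
def Spec_is_empty_block (lines : List String) (out : Bool) : Prop := out = is_empty_block_alt lines
instance (lines : List String) (out : Bool) : Decidable (Spec_is_empty_block lines out) := by unfold Spec_is_empty_block; infer_instance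

-- ===== CLAIM (what is proved, stated in full; the proofs are below) =====
def Claim_equal_is_empty_block : Prop := ∀ (lines : List String), Dom_is_empty_block lines → Spec_is_empty_block lines (is_empty_block lines)

-- ===== LEMMAS AND PROOFS =====

-- stripping to empty = every character is whitespace (on the List Char side)
theorem strip_eq_nil_iff (cs : List Char) :
    PySem.Chars.strip cs = [] ↔ cs.all PySem.Chars.isspace = true := by
  simp only [PySem.Chars.strip, PySem.Chars.lstrip, PySem.Chars.rstrip,
    List.reverse_eq_nil_iff, List.dropWhile_eq_nil_iff, List.mem_reverse, List.all_eq,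
    decide_eq_true_eq]
  constructor
  · intro h c hc
    by_cases hm : c ∈ List.dropWhile PySem.Chars.isspace cs
    · exact h c hm
    · have hsplit : List.takeWhile PySem.Chars.isspace cs ++
          List.dropWhile PySem.Chars.isspace cs = cs := List.takeWhile_append_dropWhile
      rw [← hsplit] at hc
      rcases List.mem_append.mp hc with h1 | h1
      · exact List.mem_takeWhile_imp h1
      · exact absurd h1 hm
  · intro h c hc
    exact h c ((List.dropWhile_sublist _).subset hc)

theorem str_strip_empty (s : String) :
    (PySem.Str.strip s == "") = s.toList.all PySem.Chars.isspace := by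
  rcases h : s.toList.all PySem.Chars.isspace with _ | _
  · simp only [PySem.Str.strip]
    by_contra hne
    simp only [Bool.not_eq_false, beq_iff_eq] at hne
    have : PySem.Chars.strip s.toList = [] := by
      have := congrArg String.toList hne
      simpa using this
    rw [(strip_eq_nil_iff _).mp this] at h
    exact Bool.true_eq_false ▸ h.symm ▸ rfl
  · have : PySem.Chars.strip s.toList = [] := (strip_eq_nil_iff _).mpr h
    simp [PySem.Str.strip, this]

-- the loop with first = false is just 'all lines are whitespace'
theorem loop_false (ls : List String) :
    isEmptyBlockLoop ls false = ls.all (fun l => l.toList.all PySem.Chars.isspace) := by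
  induction ls with
  | nil => rfl
  | cons l t ih =>
    simp only [isEmptyBlockLoop, Bool.false_and, List.all_cons, ih]
    rcases h : l.toList.all PySem.Chars.isspace with _ | _ <;>
      simp [← str_strip_empty, beq_iff_eq] at h ⊢ <;> simp [h]

-- "".join collapses to flatten; its all-whitespace test distributes over the lines
theorem join_strip_empty (ls : List String) :
    (PySem.Str.strip (PySem.Str.join "" ls) == "") =
      ls.all (fun l => l.toList.all PySem.Chars.isspace) := by
  rw [str_strip_empty]
  have hj : (PySem.Str.join "" ls).toList = (ls.map String.toList).flatten := by
    simp [PySem.Str.join, PySem.Chars.join]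
    induction ls with
    | nil => simp [List.intercalate]
    | cons a t ih =>
      cases t <;> simp_all [List.intercalate]
  rw [hj]
  simp only [List.all_eq, decide_eq_decide, decide_eq_true_eq]
  constructor
  · intro h l hl c hc
    exact h c (List.mem_flatten.mpr ⟨l.toList, List.mem_map_of_mem hl, hc⟩)
  · intro h c hc
    obtain ⟨L, hL, hcL⟩ := List.mem_flatten.mp hc
    obtain ⟨l, hl, rfl⟩ := List.mem_map.mp hL
    exact h l hl c hcL

-- ===== VERDICT (by name: the statement is the Claim_ definition above) =====
theorem is_empty_block_spec : Claim_equal_is_empty_block := by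
  intro lines _
  unfold Spec_is_empty_block is_empty_block is_empty_block_alt
  cases lines with
  | nil => rfl
  | cons l t =>
    by_cases hs : PySem.Str.startswith l "#" = true
    · -- first line is a comment: both skip it
      have : PySem.List.slice (l :: t) (some 1) none = t := by
        simp [PySem.List.slice_from]
      simp only [isEmptyBlockLoop, hs, Bool.true_and, if_true, this, loop_false, join_strip_empty]
    · have hsl : PySem.List.slice (l :: t) (some 0) none = l :: t := by
        simp [PySem.List.slice_from]
      simp only [isEmptyBlockLoop, hs, Bool.true_and, if_false, Bool.false_eq_true, hsl,
        join_strip_empty, List.all_cons]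
      by_cases h0 : PySem.Str.strip l = ""
      · simp only [h0, ne_eq, not_true_eq_false, if_false, loop_false]
        have : l.toList.all PySem.Chars.isspace = true := by
          rw [← str_strip_empty]; simp [h0]
        simp [this]
      · simp only [ne_eq, h0, not_false_eq_true, if_true]
        have : l.toList.all PySem.Chars.isspace = false := by
          rw [← str_strip_empty]; simp [h0]
        simp [this]
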